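-- pv_equiv track=rewrite | github.com/jamesben6688/coding | 模拟题/牌是否合法.py | is_valid_play
-- ===== SOURCE A (Python) =====
-- from collections import defaultdict
--
-- def is_valid_play(cards):
--     if len(cards) < 2:
--         return False
--
--     rank_map = {
--         '2': 2, '3': 3, '4': 4, '5': 5,
--         '6': 6, '7': 7, '8': 8, '9': 9,
--         '10': 10, 'J': 11, 'Q': 12, 'K': 13, 'A': 14
--     }
--
--     # 提取点数和花色
--     rank_values = []
--     card_count = defaultdict(int)  # 统计每张牌（点数+花色）出现次数
--
--     for card in cards:
--         rank = card[:-1]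
--         suit = card[-1]
--         if rank not in rank_map:
--             return False
--         value = rank_map[rank]
--         rank_values.append(value)
--         card_count[card] += 1
--
--     # ------- 检查是否存在 ≥3 连续的点数 -------
--     unique_ranks = sorted(set(rank_values))
--     for i in range(len(unique_ranks) - 2):
--         if (unique_ranks[i+1] == unique_ranks[i] + 1 and
--             unique_ranks[i+2] == unique_ranks[i] + 2):
--             return True
--
--     # ------- 检查是否存在某张牌出现 ≥3 次 -------
--     for count in card_count.values():
--         if count >= 3:
--             return True
--
--     return False
-- ===== SOURCE B (Python) =====
-- def is_valid_play(cards):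
--     if len(cards) < 2:
--         return False
--
--     rank_map = {
--         '2': 2, '3': 3, '4': 4, '5': 5,
--         '6': 6, '7': 7, '8': 8, '9': 9,
--         '10': 10, 'J': 11, 'Q': 12, 'K': 13, 'A': 14
--     }
--
--     values = set()
--     counts = {}
--     for card in cards:
--         rank = card[:-1]
--         if rank not in rank_map:
--             return False
--         values.add(rank_map[rank])
--         counts[card] = counts.get(card, 0) + 1
--
--     # a run of >=3 consecutive ranks: probe the set directly, no sorting
--     for v in values:
--         if v + 1 in values and v + 2 in values:
--             return True
--
--     # some exact card (rank+suit) appears >=3 times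
--     return any(c >= 3 for c in counts.values())
-- ===== Notes on version B (the rewrite author's own statement) =====
-- stated objective: idiomatic
-- what changed: The run check replaces A's sort of the unique ranks plus an indexed sliding-window scan by direct membership probes (v+1 in S and v+2 in S) on an unsorted set, and the counter is a plain dict with any() instead of defaultdict with an explicit loop.
import Mathlib
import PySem

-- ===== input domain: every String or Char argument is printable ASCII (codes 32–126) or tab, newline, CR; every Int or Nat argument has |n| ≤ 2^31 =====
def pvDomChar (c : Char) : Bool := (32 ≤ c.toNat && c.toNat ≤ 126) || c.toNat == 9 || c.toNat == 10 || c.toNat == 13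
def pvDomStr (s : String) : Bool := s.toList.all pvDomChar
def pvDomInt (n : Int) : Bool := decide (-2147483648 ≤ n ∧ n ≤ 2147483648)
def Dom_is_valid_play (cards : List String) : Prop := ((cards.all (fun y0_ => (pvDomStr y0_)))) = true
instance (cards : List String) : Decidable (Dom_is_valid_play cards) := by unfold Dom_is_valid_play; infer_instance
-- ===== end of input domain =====

-- B replaces A's sort-plus-sliding-window run check by direct set-membership probes (v+1, v+2) on an
-- unsorted set of rank values (idiomatic rewrite; same cost class). A raises IndexError on empty-string cards;
-- those inputs are excluded by Pre_.

-- the shared rank table (both Pythons define the identical rank_map literal)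
def rankMap : PySem.Dict String Int :=
  PySem.Dict.ofList [("2", 2), ("3", 3), ("4", 4), ("5", 5), ("6", 6), ("7", 7), ("8", 8),
                     ("9", 9), ("10", 10), ("J", 11), ("Q", 12), ("K", 13), ("A", 14)]

-- ===== PORT A =====
-- the index loop 'for i in range(len(u)-2)' over the sorted unique ranks, as a window recursion
def runScanA : List Int → Bool
  | a :: b :: c :: t => if b = a + 1 ∧ c = a + 2 then true else runScanA (b :: c :: t)
  | _ => false

def loopA : List String → List Int → PySem.Dict String Int → Bool
  | [], rank_values, card_count =>
      let unique_ranks := PySem.List.sorted (PySem.Set.ofList rank_values) (fun x => x) false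
      if runScanA unique_ranks then true
      else card_count.values.any (fun c => decide (3 ≤ c))
  | card :: rest, rank_values, card_count =>
      let rank := PySem.Str.slice card none (some (-1))
      match PySem.Str.pyGet? card (-1) with   -- suit = card[-1]: IndexError on '' (excluded by Pre_)
      | none => false
      | some _suit =>
          match rankMap.get? rank with
          | none => false
          | some value =>
              loopA rest (rank_values ++ [value]) (card_count.insert card (card_count.getD card 0 + 1))

def is_valid_play (cards : List String) : Bool :=
  if cards.length < 2 then false
  else loopA cards [] PySem.Dict.empty

-- ===== PORT B =====
def loopB : List String → PySem.Set Int → PySem.Dict String Int → Bool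
  | [], values, counts =>
      if values.any (fun v => PySem.Set.contains values (v + 1) && PySem.Set.contains values (v + 2))
      then true
      else counts.values.any (fun c => decide (3 ≤ c))
  | card :: rest, values, counts =>
      let rank := PySem.Str.slice card none (some (-1))
      match rankMap.get? rank with
      | none => false
      | some v => loopB rest (PySem.Set.add values v) (counts.insert card (counts.getD card 0 + 1))

def is_valid_play_alt (cards : List String) : Bool :=
  if cards.length < 2 then false
  else loopB cards [] PySem.Dict.empty

-- ===== PRECONDITION & SPEC =====
-- Pre_ excludes exactly the inputs on which A raises IndexError (card[-1] on the empty string):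
-- lists of >= 2 cards containing '' whose cards before the first '' all have ranks in the table.
def rankStrings : List String := ["2", "3", "4", "5", "6", "7", "8", "9", "10", "J", "Q", "K", "A"]
def Pre_is_valid_play (cards : List String) : Prop :=
  "" ∈ cards → (cards.length < 2 ∨
    ∃ c ∈ cards.takeWhile (fun c => decide (c ≠ "")), PySem.Str.slice c none (some (-1)) ∉ rankStrings)
instance (cards : List String) : Decidable (Pre_is_valid_play cards) := by
  unfold Pre_is_valid_play; infer_instance

def pvWitness_is_valid_play : List String := ["3H", "4H", "5H"]

def Spec_is_valid_play (cards : List String) (out : Bool) : Prop := out = is_valid_play_alt cards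
instance (cards : List String) (out : Bool) : Decidable (Spec_is_valid_play cards out) := by
  unfold Spec_is_valid_play; infer_instance

-- ===== CLAIM (what is proved, stated in full; the proofs are below) =====
def Claim_equal_is_valid_play : Prop := ∀ (cards : List String), Dom_is_valid_play cards → Pre_is_valid_play cards → Spec_is_valid_play cards (is_valid_play cards)

-- ===== LEMMAS AND PROOFS =====

lemma pyGet_neg_one (s : String) (h : s ≠ "") : ∃ c, PySem.Str.pyGet? s (-1) = some c := by
  cases hs : s.toList with
  | nil => exact absurd (by cases s; simp_all) h
  | cons a t => simp [PySem.Str.pyGet?, hs, PySem.List.pyGet?, PySem.List.pyIdx?]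

lemma runScan_true_iff (u : List Int) (hs : u.Pairwise (· < ·)) :
    runScanA u = true ↔ ∃ v ∈ u, (v + 1) ∈ u ∧ (v + 2) ∈ u := by
  induction u with
  | nil => simp [runScanA]
  | cons a t ih =>
    cases t with
    | nil =>
      rw [show runScanA [a] = false from rfl]
      simp only [Bool.false_eq_true, false_iff]
      rintro ⟨v, hv, h1, h2⟩
      simp only [List.mem_singleton] at hv h1 h2
      omega
    | cons b t' =>
      cases t' with
      | nil =>
        have hab : a < b := (List.pairwise_cons.mp hs).1 b (List.mem_singleton.mpr rfl)
        rw [show runScanA [a, b] = false from rfl]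
        simp only [Bool.false_eq_true, false_iff]
        rintro ⟨v, hv, h1, h2⟩
        simp only [List.mem_cons, List.not_mem_nil, or_false] at hv h1 h2
        omega
      | cons c t'' =>
        have hcons := List.pairwise_cons.mp hs
        have hab : ∀ x ∈ b :: c :: t'', a < x := hcons.1
        have hst : (b :: c :: t'').Pairwise (· < ·) := hcons.2
        have hbc : ∀ x ∈ c :: t'', b < x := (List.pairwise_cons.mp hst).1
        have hcd : ∀ x ∈ t'', c < x :=
          (List.pairwise_cons.mp (List.pairwise_cons.mp hst).2).1
        have key : ∀ x, x ∈ a :: b :: c :: t'' → a < x → x ∈ b :: c :: t'' := by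
          intro x hx hax
          rcases List.mem_cons.mp hx with rfl | hx2
          · exact absurd hax (lt_irrefl _)
          · exact hx2
        rw [show runScanA (a :: b :: c :: t'') =
              if b = a + 1 ∧ c = a + 2 then true else runScanA (b :: c :: t'') from rfl]
        split_ifs with hwin
        · constructor
          · intro _
            refine ⟨a, List.mem_cons_self .., ?_, ?_⟩
            · rw [← hwin.1]; exact List.mem_cons_of_mem _ (List.mem_cons_self ..)
            · rw [← hwin.2]
              exact List.mem_cons_of_mem _ (List.mem_cons_of_mem _ (List.mem_cons_self ..))
          · intro _; rfl
        · rw [ih hst]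
          constructor
          · rintro ⟨v, hv, h1, h2⟩
            exact ⟨v, List.mem_cons_of_mem _ hv, List.mem_cons_of_mem _ h1,
              List.mem_cons_of_mem _ h2⟩
          · rintro ⟨v, hv, h1, h2⟩
            by_cases hva : v = a
            · subst hva
              have h1' : (v + 1) ∈ b :: c :: t'' := key _ h1 (by omega)
              have hb : b = v + 1 := by
                rcases List.mem_cons.mp h1' with h' | h'
                · omega
                · have hb1 := hbc _ h'
                  have hb2 := hab b (List.mem_cons_self ..)
                  omega
              have h2' : (v + 2) ∈ b :: c :: t'' := key _ h2 (by omega)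
              have h2'' : (v + 2) ∈ c :: t'' := by
                rcases List.mem_cons.mp h2' with h' | h'
                · omega
                · exact h'
              have hc : c = v + 2 := by
                rcases List.mem_cons.mp h2'' with h' | h'
                · omega
                · have hc1 := hcd _ h'
                  have hc2 := hbc c (List.mem_cons_self ..)
                  omega
              exact absurd ⟨by omega, by omega⟩ hwin
            · have hv' : v ∈ b :: c :: t'' := by
                rcases List.mem_cons.mp hv with h' | h'
                · exact absurd h' hva
                · exact h'
              have hav : a < v := hab _ hv'
              exact ⟨v, hv', key _ h1 (by omega), key _ h2 (by omega)⟩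

lemma runScan_eq_any (rvs : List Int) :
    runScanA (PySem.List.sorted (PySem.Set.ofList rvs) (fun x => x) false) =
      (PySem.Set.ofList rvs).any (fun v =>
        PySem.Set.contains (PySem.Set.ofList rvs) (v + 1) &&
        PySem.Set.contains (PySem.Set.ofList rvs) (v + 2)) := by
  rw [Bool.eq_iff_iff,
    runScan_true_iff _ (PySem.List.sorted_ofList_pairwise_lt rvs)]
  simp only [List.any_eq_true, Bool.and_eq_true, PySem.Set.contains_iff,
    PySem.List.mem_sorted]

lemma rank_mem_of_get (r : String) (v : Int) (hm : rankMap.get? r = some v) :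
    r ∈ rankStrings := by
  have hc : rankMap.contains r = true := by
    rw [PySem.Dict.contains_eq_isSome_get?, hm]; rfl
  have hk : r ∈ rankMap.keys := (PySem.Dict.contains_iff_mem_keys _ _).mp hc
  have he : rankMap.keys = rankStrings := by decide
  exact he ▸ hk

lemma loop_eq (cards : List String) : ∀ (rvs : List Int) (cc : PySem.Dict String Int),
    ("" ∈ cards → ∃ c ∈ cards.takeWhile (fun c => decide (c ≠ "")),
      PySem.Str.slice c none (some (-1)) ∉ rankStrings) →
    loopA cards rvs cc = loopB cards (PySem.Set.ofList rvs) cc := by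
  induction cards with
  | nil =>
    intro rvs cc _
    simp only [loopA, loopB]
    rw [runScan_eq_any]
  | cons card rest ih =>
    intro rvs cc h
    by_cases hcard : card = ""
    · subst hcard
      obtain ⟨c, hc, -⟩ := h (List.mem_cons_self ..)
      simp [List.takeWhile] at hc
    · obtain ⟨c0, hc0⟩ := pyGet_neg_one card hcard
      cases hm : rankMap.get? (PySem.Str.slice card none (some (-1))) with
      | none => simp only [loopA, loopB, hc0, hm]
      | some v =>
        simp only [loopA, loopB, hc0, hm]
        rw [← PySem.Set.ofList_append_singleton]
        refine ih _ _ (fun hmem => ?_)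
        obtain ⟨c, hc, hbad⟩ := h (List.mem_cons_of_mem _ hmem)
        rw [List.takeWhile_cons_of_pos (by simp [hcard])] at hc
        rcases List.mem_cons.mp hc with rfl | hc'
        · exact absurd (rank_mem_of_get _ _ hm) hbad
        · exact ⟨c, hc', hbad⟩

-- ===== VERDICT (by name: the statement is the Claim_ definition above) =====
theorem is_valid_play_spec : Claim_equal_is_valid_play := by
  intro cards _ hpre
  unfold Spec_is_valid_play is_valid_play is_valid_play_alt
  split
  · rfl
  · next hlen =>
    refine loop_eq cards [] PySem.Dict.empty (fun hmem => ?_)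
    rcases hpre hmem with hlt | hex
    · exact absurd hlt hlen
    · exact hex
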